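-- pv_equiv track=rewrite | github.com/jonwashburn/recognition-ledger | scripts/audit_foundation.py | analyze_circular_imports
-- ===== SOURCE A (Python) =====
-- from typing import Dict, List, Tuple, Set
--
-- def analyze_circular_imports(file_imports: Dict[str, List[str]]) -> List[List[str]]:
--     """Detect circular import chains"""
--     def find_cycles_from(start: str, current: str, path: List[str], visited: Set[str]) -> List[List[str]]:
--         if current in path:
--             # Found a cycle
--             cycle_start = path.index(current)
--             return [path[cycle_start:] + [current]]
--
--         if current in visited:
--             return []
--
--         visited.add(current)
--         cycles = []
--
--         if current in file_imports:
--             for imported in file_imports[current]: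
--                 if imported in file_imports:  # Only follow foundation imports
--                     cycles.extend(find_cycles_from(start, imported, path + [current], visited))
--
--         return cycles
--
--     all_cycles = []
--     for file in file_imports:
--         cycles = find_cycles_from(file, file, [], set())
--         for cycle in cycles:
--             # Normalize cycle to start with smallest element
--             if cycle and cycle not in all_cycles:
--                 min_idx = cycle.index(min(cycle))
--                 normalized = cycle[min_idx:] + cycle[:min_idx]
--                 if normalized not in all_cycles:
--                     all_cycles.append(normalized)
--
--     return all_cycles
-- ===== SOURCE B (Python) =====
-- def analyze_circular_imports(file_imports):
--     """Detect circular import chains (iterative explicit-stack DFS, cycles normalized as found)"""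
--     all_cycles = []
--     for start in file_imports:
--         visited = set()
--         stack = [(start, [])]
--         while stack:
--             current, path = stack.pop()
--             if current in path:
--                 i = path.index(current)
--                 cycle = path[i:] + [current]
--                 if cycle not in all_cycles:
--                     m = min(cycle)
--                     j = cycle.index(m)
--                     normalized = cycle[j:] + cycle[:j]
--                     if normalized not in all_cycles:
--                         all_cycles.append(normalized)
--             elif current in visited:
--                 continue
--             else:
--                 visited.add(current)
--                 if current in file_imports:
--                     new_path = path + [current]
--                     # push in reversed order so frames pop in the original import order
--                     for imported in reversed(file_imports[current]):
--                         if imported in file_imports: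
--                             stack.append((imported, new_path))
--     return all_cycles
-- ===== Notes on version B (the rewrite author's own statement) =====
-- stated objective: alternative
-- what changed: The recursive find_cycles_from helper is replaced by an iterative DFS with an explicit worklist stack of (node, path) frames (children pushed in reversed order so they pop in import order), and cycles are normalized and deduplicated into all_cycles the moment they are popped instead of being collected per start and post-processed.
import Mathlib
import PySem

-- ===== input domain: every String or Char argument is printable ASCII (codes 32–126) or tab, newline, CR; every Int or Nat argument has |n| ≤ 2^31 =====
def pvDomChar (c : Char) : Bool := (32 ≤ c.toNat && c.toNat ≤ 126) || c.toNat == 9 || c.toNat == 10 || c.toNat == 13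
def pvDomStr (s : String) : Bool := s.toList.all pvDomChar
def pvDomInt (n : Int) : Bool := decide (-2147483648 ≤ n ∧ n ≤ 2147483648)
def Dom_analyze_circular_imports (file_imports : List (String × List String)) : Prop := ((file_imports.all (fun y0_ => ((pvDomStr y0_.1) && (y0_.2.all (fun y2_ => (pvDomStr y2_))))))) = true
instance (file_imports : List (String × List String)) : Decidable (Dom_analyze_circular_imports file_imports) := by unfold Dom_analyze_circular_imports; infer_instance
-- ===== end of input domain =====

-- B replaces the recursive cycle search by an explicit-stack iterative DFS that normalizes and
-- records cycles as they are popped (alternative decomposition; same cost, no speed claim).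


-- ===== PORT A =====

-- path[path.index(current):] + [current]  (guarded by 'current in path' at both call sites)
def pvCycleAt (path : List String) (current : String) : List String :=
  match PySem.List.index? path current with
  | some k => PySem.List.slice path (some (k : Int)) none ++ [current]
  | none => []

-- number of keys not yet visited: the measure that bounds A's recursion depth (fuel) and B's loop
def pvUnvis (d : PySem.Dict String (List String)) (vis : PySem.Set String) : Nat :=
  d.keys.countP (fun k => !(PySem.Set.contains vis k))

-- find_cycles_from, with a fuel guard for totality (fuel keys.length+1 is never exhausted: each
-- recursive call visits a fresh key).  The 'for imported in …' loop is the mutual helper pvLoopA.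
mutual
def pvFindA (d : PySem.Dict String (List String)) : Nat → String → List String → PySem.Set String → (List (List String) × PySem.Set String)
  | 0, _, _, vis => ([], vis)
  | f + 1, current, path, vis =>
      if path.contains current then ([pvCycleAt path current], vis)
      else if PySem.Set.contains vis current then ([], vis)
      else
        let vis1 := PySem.Set.add vis current
        match PySem.Dict.get? d current with
        | none => ([], vis1)
        | some imps => pvLoopA d f imps (path ++ [current]) vis1
  termination_by f _ _ _ => (f, 0)

def pvLoopA (d : PySem.Dict String (List String)) : Nat → List String → List String → PySem.Set String → (List (List String) × PySem.Set String)
  | _, [], _, vis => ([], vis)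
  | f, imported :: rest, path, vis =>
      if PySem.Dict.contains d imported then
        let r := pvFindA d f imported path vis
        let r2 := pvLoopA d f rest path r.2
        (r.1 ++ r2.1, r2.2)
      else pvLoopA d f rest path vis
  termination_by f rest _ _ => (f, rest.length + 1)
end

-- the body of A's 'for cycle in cycles' normalization loop
def pvStepA (all : List (List String)) (cycle : List String) : List (List String) :=
  if !cycle.isEmpty && !(all.contains cycle) then
    match PySem.List.min? cycle (fun x => x) with
    | none => all
    | some m =>
        match PySem.List.index? cycle m with
        | none => all
        | some j =>
            let normalized := PySem.List.slice cycle (some (j : Int)) none ++ PySem.List.slice cycle none (some (j : Int))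
            if all.contains normalized then all else all ++ [normalized]
  else all

def analyze_circular_imports (file_imports : List (String × List String)) : List (List String) :=
  let d := PySem.Dict.ofList file_imports
  d.keys.foldl (fun all_cycles file =>
    (pvFindA d (d.keys.length + 1) file [] PySem.Set.empty).1.foldl pvStepA all_cycles) []

-- ===== PORT B =====

-- normalize a popped cycle and append it to all_cycles unless (raw or normalized) already there
def pvRecordB (all : List (List String)) (cycle : List String) : List (List String) :=
  if all.contains cycle then all
  else
    match PySem.List.min? cycle (fun x => x) with
    | none => all
    | some m =>
        match PySem.List.index? cycle m with
        | none => all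
        | some j =>
            let normalized := PySem.List.slice cycle (some (j : Int)) none ++ PySem.List.slice cycle none (some (j : Int))
            if all.contains normalized then all else all ++ [normalized]

theorem pvContains_add (vis : PySem.Set String) (c k : String) :
    PySem.Set.contains (PySem.Set.add vis c) k = (PySem.Set.contains vis k || k == c) := by
  simp [pysem, Bool.or_comm, Bool.beq_eq_decide_eq]

theorem pvUnvis_add_lt (d : PySem.Dict String (List String)) (vis : PySem.Set String) (c : String)
    (hk : PySem.Dict.contains d c = true) (hv : PySem.Set.contains vis c = false) :
    pvUnvis d (PySem.Set.add vis c) < pvUnvis d vis := by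
  unfold pvUnvis
  rw [List.countP_eq_length_filter, List.countP_eq_length_filter]
  have himp : ∀ k : String, (!PySem.Set.contains (PySem.Set.add vis c) k) = true → (!PySem.Set.contains vis k) = true := by
    intro k h
    rw [pvContains_add] at h
    simp only [Bool.not_eq_eq_eq_not, Bool.not_true, Bool.or_eq_false_iff] at h
    simp only [Bool.not_eq_eq_eq_not, Bool.not_true]
    exact h.1
  have hsub := List.monotone_filter_right d.keys himp
  apply Nat.lt_of_le_of_ne hsub.length_le
  intro heq
  have hfe := hsub.eq_of_length heq
  have hcq : c ∈ List.filter (fun k => !PySem.Set.contains vis k) d.keys :=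
    List.mem_filter.mpr ⟨(PySem.Dict.contains_iff_mem_keys d c).mp hk, by simp only [Bool.not_eq_eq_eq_not, Bool.not_true]; exact hv⟩
  rw [← hfe] at hcq
  have hcontra := (List.mem_filter.mp hcq).2
  rw [pvContains_add] at hcontra
  simp at hcontra

theorem pvUnvis_add_eq (d : PySem.Dict String (List String)) (vis : PySem.Set String) (c : String)
    (hk : PySem.Dict.contains d c = false) :
    pvUnvis d (PySem.Set.add vis c) = pvUnvis d vis := by
  unfold pvUnvis
  apply List.countP_congr
  intro k hkmem
  have hne : (k == c) = false := by
    refine beq_eq_false_iff_ne.mpr (fun h => ?_)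
    subst h
    exact absurd ((PySem.Dict.contains_iff_mem_keys d k).mpr hkmem) (by simp [hk])
  rw [pvContains_add, hne, Bool.or_false]

-- the 'while stack:' loop; the list head is the stack top, so pushing the reversed children one by
-- one is prepending them in original import order.  Terminates: each iteration either visits a
-- fresh key (pvUnvis drops) or shrinks the stack.
def pvRunB (d : PySem.Dict String (List String)) : List (String × List String) → PySem.Set String → List (List String) → List (List String)
  | [], _, all => all
  | (current, path) :: rest, vis, all =>
      if path.contains current then
        pvRunB d rest vis (pvRecordB all (pvCycleAt path current))
      else if PySem.Set.contains vis current then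
        pvRunB d rest vis all
      else
        pvRunB d
          ((match PySem.Dict.get? d current with
            | some imps => (imps.filter (fun i => PySem.Dict.contains d i)).map (fun i => (i, path ++ [current]))
            | none => []) ++ rest)
          (PySem.Set.add vis current) all
termination_by stack vis _ => (pvUnvis d vis, stack.length)
decreasing_by
  · exact Prod.Lex.right _ (by simp)
  · exact Prod.Lex.right _ (by simp)
  · rename_i _hpath hvis
    cases hk : PySem.Dict.contains d current with
    | true => exact Prod.Lex.left _ _ (pvUnvis_add_lt d vis current hk (Bool.not_eq_true _ ▸ (by simpa using hvis)))
    | false =>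
        rw [(PySem.Dict.get?_eq_none_iff_contains d current).mpr hk]
        rw [pvUnvis_add_eq d vis current hk]
        exact Prod.Lex.right _ (by simp)

def analyze_circular_imports_alt (file_imports : List (String × List String)) : List (List String) :=
  let d := PySem.Dict.ofList file_imports
  d.keys.foldl (fun all_cycles start => pvRunB d [(start, [])] PySem.Set.empty all_cycles) []

-- ===== PRECONDITION & SPEC =====
def Spec_analyze_circular_imports (file_imports : List (String × List String)) (out : List (List String)) : Prop := out = analyze_circular_imports_alt file_imports
instance (file_imports : List (String × List String)) (out : List (List String)) : Decidable (Spec_analyze_circular_imports file_imports out) := by unfold Spec_analyze_circular_imports; infer_instance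

-- ===== CLAIM (what is proved, stated in full; the proofs are below) =====
def Claim_equal_analyze_circular_imports : Prop := ∀ (file_imports : List (String × List String)), Dom_analyze_circular_imports file_imports → Spec_analyze_circular_imports file_imports (analyze_circular_imports file_imports)

-- ===== LEMMAS AND PROOFS =====

theorem pvSubset_add (s : PySem.Set String) (x : String) : s ⊆ PySem.Set.add s x :=
  fun _ hy => (PySem.Set.mem_add s x _).mpr (Or.inl hy)

-- visited only grows: the loop part, given the find part at the same fuel
theorem pvMonoLoop (d : PySem.Dict String (List String)) (g : Nat)
    (h : ∀ c p vis, vis ⊆ (pvFindA d g c p vis).2) :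
    ∀ imps q vis, vis ⊆ (pvLoopA d g imps q vis).2 := by
  intro imps
  induction imps with
  | nil => intro q vis; simp [pvLoopA]
  | cons i is ih =>
      intro q vis
      simp only [pvLoopA]
      split
      · exact fun y hy => ih q _ (h i q vis hy)
      · exact ih q vis

-- visited only grows through A's DFS
theorem pvMono (d : PySem.Dict String (List String)) : ∀ f : Nat,
    (∀ c p vis, vis ⊆ (pvFindA d f c p vis).2) ∧
    (∀ imps q vis, vis ⊆ (pvLoopA d f imps q vis).2) := by
  intro f
  induction f with
  | zero =>
      have hF : ∀ c p vis, vis ⊆ (pvFindA d 0 c p vis).2 := by intro c p vis; simp [pvFindA]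
      exact ⟨hF, pvMonoLoop d 0 hF⟩
  | succ f ihf =>
      have hF : ∀ c p vis, vis ⊆ (pvFindA d (f + 1) c p vis).2 := by
        intro c p vis
        simp only [pvFindA]
        split
        · exact fun _ hy => hy
        · split
          · exact fun _ hy => hy
          · split
            · exact pvSubset_add vis c
            · exact fun y hy => ihf.2 _ _ _ (pvSubset_add vis c hy)
      exact ⟨hF, pvMonoLoop d (f + 1) hF⟩

theorem pvCycleAt_ne_nil (p : List String) (c : String) (h : p.contains c = true) :
    pvCycleAt p c ≠ [] := by
  unfold pvCycleAt
  rcases ho : PySem.List.index? p c with _ | k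
  · rw [PySem.List.index?_eq_none_iff] at ho
    simp only [List.contains_iff_mem] at h
    exact absurd h ho
  · simp

theorem pvNeNilLoop (d : PySem.Dict String (List String)) (g : Nat)
    (h : ∀ c p vis cy, cy ∈ (pvFindA d g c p vis).1 → cy ≠ []) :
    ∀ imps q vis cy, cy ∈ (pvLoopA d g imps q vis).1 → cy ≠ [] := by
  intro imps
  induction imps with
  | nil => intro q vis cy hcy; simp [pvLoopA] at hcy
  | cons i is ih =>
      intro q vis cy hcy
      simp only [pvLoopA] at hcy
      split at hcy
      · rcases List.mem_append.mp hcy with hm | hm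
        · exact h i q vis cy hm
        · exact ih q _ cy hm
      · exact ih q vis cy hcy

-- every cycle A's DFS emits is nonempty (it ends with [current])
theorem pvNeNil (d : PySem.Dict String (List String)) : ∀ f : Nat,
    (∀ c p vis cy, cy ∈ (pvFindA d f c p vis).1 → cy ≠ []) ∧
    (∀ imps q vis cy, cy ∈ (pvLoopA d f imps q vis).1 → cy ≠ []) := by
  intro f
  induction f with
  | zero =>
      have hF : ∀ c p vis cy, cy ∈ (pvFindA d 0 c p vis).1 → cy ≠ [] := by
        intro c p vis cy hcy; simp [pvFindA] at hcy
      exact ⟨hF, pvNeNilLoop d 0 hF⟩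
  | succ f ihf =>
      have hF : ∀ c p vis cy, cy ∈ (pvFindA d (f + 1) c p vis).1 → cy ≠ [] := by
        intro c p vis cy hcy
        simp only [pvFindA] at hcy
        split at hcy
        · rename_i hp
          simp only [List.mem_singleton] at hcy
          exact hcy ▸ pvCycleAt_ne_nil p c hp
        · split at hcy
          · simp at hcy
          · split at hcy
            · simp at hcy
            · exact ihf.2 _ _ _ cy hcy
      exact ⟨hF, pvNeNilLoop d (f + 1) hF⟩

theorem pvUnvis_mono (d : PySem.Dict String (List String)) (vis vis' : PySem.Set String)
    (h : vis ⊆ vis') : pvUnvis d vis' ≤ pvUnvis d vis := by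
  unfold pvUnvis
  apply List.countP_mono_left
  intro k _ hk
  simp only [Bool.not_eq_eq_eq_not, Bool.not_true] at hk ⊢
  cases hm : PySem.Set.contains vis k with
  | false => rfl
  | true =>
      have : PySem.Set.contains vis' k = true :=
        (PySem.Set.contains_iff _ _).mpr (h ((PySem.Set.contains_iff _ _).mp hm))
      rw [this] at hk
      exact absurd hk (by simp)

-- A's normalization step and B's record step agree on nonempty cycles
theorem pvStep_eq (all : List (List String)) (cy : List String) (h : cy ≠ []) :
    pvStepA all cy = pvRecordB all cy := by
  unfold pvStepA pvRecordB
  have he : cy.isEmpty = false := by simpa using h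
  cases hc : all.contains cy <;> simp [he]

-- the inner 'for imported in …' loop of A against B's pushed child frames
theorem pvLoopSim (d : PySem.Dict String (List String)) (f : Nat)
    (ihf : ∀ c p vis rest all, pvUnvis d vis < f →
      pvRunB d ((c, p) :: rest) vis all =
        pvRunB d rest (pvFindA d f c p vis).2 ((pvFindA d f c p vis).1.foldl pvRecordB all)) :
    ∀ imps q vis rest all, pvUnvis d vis < f →
      pvRunB d ((imps.filter (fun i => PySem.Dict.contains d i)).map (fun i => (i, q)) ++ rest) vis all =
        pvRunB d rest (pvLoopA d f imps q vis).2 ((pvLoopA d f imps q vis).1.foldl pvRecordB all) := by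
  intro imps
  induction imps with
  | nil => intro q vis rest all _; simp [pvLoopA]
  | cons i is ih =>
      intro q vis rest all hlt
      cases hki : PySem.Dict.contains d i with
      | false => simpa [pvLoopA, hki] using ih q vis rest all hlt
      | true =>
          simp only [pvLoopA, hki, if_pos, List.filter_cons_of_pos, List.map_cons, List.cons_append]
          rw [ihf i q vis _ all hlt]
          have hsub : vis ⊆ (pvFindA d f i q vis).2 := (pvMono d f).1 i q vis
          have hlt2 : pvUnvis d (pvFindA d f i q vis).2 < f :=
            lt_of_le_of_lt (pvUnvis_mono d vis _ hsub) hlt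
          rw [ih q _ rest _ hlt2]
          simp [List.foldl_append]

-- MAIN SIMULATION: popping one frame of B's stack performs exactly A's recursive call
theorem pvSim (d : PySem.Dict String (List String)) : ∀ f : Nat, ∀ c p vis rest all, pvUnvis d vis < f →
    pvRunB d ((c, p) :: rest) vis all =
      pvRunB d rest (pvFindA d f c p vis).2 ((pvFindA d f c p vis).1.foldl pvRecordB all) := by
  intro f
  induction f with
  | zero => intro c p vis rest all hlt; omega
  | succ f ihf =>
      intro c p vis rest all hlt
      rw [pvRunB]
      by_cases hp : c ∈ p
      · simp [pvFindA, hp]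
      · by_cases hv : c ∈ vis
        · simp [pvFindA, hp, hv]
        · have hv' : PySem.Set.contains vis c = false := by
            cases hvb : PySem.Set.contains vis c with
            | false => rfl
            | true => exact absurd ((PySem.Set.contains_iff _ _).mp hvb) hv
          cases hget : PySem.Dict.get? d c with
          | none => simp [pvFindA, hp, hv, hget]
          | some imps =>
              have hkc : PySem.Dict.contains d c = true := by
                cases hkk : PySem.Dict.contains d c with
                | true => rfl
                | false =>
                    rw [(PySem.Dict.get?_eq_none_iff_contains d c).mpr hkk] at hget
                    exact absurd hget (by simp)
              have hlt1 : pvUnvis d (PySem.Set.add vis c) < f := by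
                have := pvUnvis_add_lt d vis c hkc hv'
                omega
              have hmain := pvLoopSim d f ihf imps (p ++ [c]) (PySem.Set.add vis c) rest all hlt1
              simp only [pvFindA, hget]
              simp [hp, hv]
              have hadd : PySem.Set.add vis c = vis ++ [c] := by
                simp [PySem.Set.add, hv]
              rw [hadd] at hmain
              exact hmain


-- ===== VERDICT (by name: the statement is the Claim_ definition above) =====
theorem analyze_circular_imports_spec : Claim_equal_analyze_circular_imports := by
  intro file_imports _
  unfold Spec_analyze_circular_imports analyze_circular_imports analyze_circular_imports_alt
  set d := PySem.Dict.ofList file_imports with hd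
  have hpt : ∀ (all : List (List String)) (file : String),
      (pvFindA d (d.keys.length + 1) file [] PySem.Set.empty).1.foldl pvStepA all =
        pvRunB d [(file, [])] PySem.Set.empty all := by
    intro all file
    have hlt : pvUnvis d PySem.Set.empty < d.keys.length + 1 :=
      Nat.lt_succ_of_le List.countP_le_length
    rw [pvSim d (d.keys.length + 1) file [] PySem.Set.empty [] all hlt]
    rw [pvRunB]
    exact PySem.List.foldl_congr_mem _ _ _ all (fun acc cy hcy =>
      pvStep_eq acc cy ((pvNeNil d (d.keys.length + 1)).1 file [] PySem.Set.empty cy hcy))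
  have hfe : (fun (all_cycles : List (List String)) (file : String) =>
        (pvFindA d (d.keys.length + 1) file [] PySem.Set.empty).1.foldl pvStepA all_cycles)
      = (fun (all_cycles : List (List String)) (start : String) =>
        pvRunB d [(start, [])] PySem.Set.empty all_cycles) :=
    funext fun a => funext fun s => hpt a s
  simp only [hfe]
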